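-- pv_equiv track=rewrite | github.com/Murali-group/tox_signaling_networks | src/graphspace/get_interaction_evidence.py | addToEvidenceDict
-- ===== SOURCE A (Python) =====
-- def addToEvidenceDict(evidence, e, directed, source, interactiontype, detectionmethod, pubid):
--     """ add the evidence of the edge to the evidence dictionary
--     *pubids*: publication id to add to this edge.
--     """
--     #if e not in evidence:
--     #    evidence[e] = {}
--     if source not in evidence[e]:
--         evidence[e][source] = {}
--     if interactiontype not in evidence[e][source]:
--         evidence[e][source][interactiontype] = {}
--     if detectionmethod not in evidence[e][source][interactiontype]:
--         evidence[e][source][interactiontype][detectionmethod] = set()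
--     evidence[e][source][interactiontype][detectionmethod].add(pubid)
--
--     if not directed:
--         # add the evidence for both directions
--         evidence = addToEvidenceDict(evidence, (e[1],e[0]), True, source, interactiontype, detectionmethod, pubid)
--
--     return evidence
-- ===== SOURCE B (Python) =====
-- def addToEvidenceDict(evidence, e, directed, source, interactiontype, detectionmethod, pubid):
--     """ add the evidence of the edge to the evidence dictionary (iterative over orientations) """
--     edges = [e] if directed else [e, (e[1], e[0])]
--     for edge in edges:
--         d = evidence[edge].setdefault(source, {})
--         d2 = d.setdefault(interactiontype, {})
--         d2.setdefault(detectionmethod, set()).add(pubid)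
--     return evidence
-- ===== Notes on version B (the rewrite author's own statement) =====
-- stated objective: simpler
-- what changed: Replaces the self-recursive reverse-direction call and the three explicit 'if key not in' membership checks with a single loop over the list of edge orientations using dict.setdefault for each nesting level.
import Mathlib
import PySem

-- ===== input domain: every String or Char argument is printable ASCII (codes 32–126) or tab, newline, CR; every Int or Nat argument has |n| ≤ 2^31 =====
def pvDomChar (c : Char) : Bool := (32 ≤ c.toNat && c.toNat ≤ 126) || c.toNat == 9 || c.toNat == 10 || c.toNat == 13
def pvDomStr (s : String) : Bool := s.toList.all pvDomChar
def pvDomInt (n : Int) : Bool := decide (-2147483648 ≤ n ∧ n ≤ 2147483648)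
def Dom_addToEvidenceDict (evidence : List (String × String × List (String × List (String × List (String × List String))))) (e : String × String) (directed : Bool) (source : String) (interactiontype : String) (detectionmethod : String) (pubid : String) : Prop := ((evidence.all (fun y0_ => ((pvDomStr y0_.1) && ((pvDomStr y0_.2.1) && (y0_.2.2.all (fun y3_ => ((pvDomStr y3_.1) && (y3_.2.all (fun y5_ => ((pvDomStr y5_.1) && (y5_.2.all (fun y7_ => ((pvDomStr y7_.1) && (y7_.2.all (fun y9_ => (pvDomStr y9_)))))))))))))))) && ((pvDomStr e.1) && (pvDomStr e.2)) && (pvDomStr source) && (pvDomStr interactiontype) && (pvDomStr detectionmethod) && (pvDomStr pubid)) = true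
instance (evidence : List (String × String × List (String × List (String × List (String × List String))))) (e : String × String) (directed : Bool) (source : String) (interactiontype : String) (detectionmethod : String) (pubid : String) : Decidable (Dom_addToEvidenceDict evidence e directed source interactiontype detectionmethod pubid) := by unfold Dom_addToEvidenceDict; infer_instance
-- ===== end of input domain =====

-- B replaces A's self-recursion on the reversed edge and its three `if key not in` checks by one
-- loop over the orientation list with dict.setdefault (objective: simpler). Both Pythons mutate
-- `evidence` in place identically and return it; the theorems are about the returned value.


-- ===== PORT A =====
-- Shared index helpers for the outer dict (tuple-keyed in Python; entries here are (k1, k2, value)).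
-- `lookupEdge` is `evidence[e]` (first match; `none` = KeyError) and `storeEdge` writes the value
-- back at key `e` in place — exact for Python's unique-key dicts.
def lookupEdge {V : Type} (ev : List (String × String × V)) (e : String × String) : Option V :=
  match ev with
  | [] => none
  | (a, b, v) :: t => if a == e.1 && b == e.2 then some v else lookupEdge t e

def storeEdge {V : Type} (ev : List (String × String × V)) (e : String × String) (v' : V) : List (String × String × V) :=
  match ev with
  | [] => []
  | (a, b, v) :: t => if a == e.1 && b == e.2 then (a, b, v') :: t else (a, b, v) :: storeEdge t e v'

-- Literal port of A: the three `if key not in …` inserts, the set add, then the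
-- self-recursive call for the reverse direction when not directed.
def addToEvidenceDict (evidence : List (String × String × List (String × List (String × List (String × List String))))) (e : String × String) (directed : Bool) (source : String) (interactiontype : String) (detectionmethod : String) (pubid : String) : List (String × String × List (String × List (String × List (String × List String)))) :=
  match lookupEdge evidence e with
  | none => evidence   -- Python raises KeyError here; excluded by Pre_
  | some d0 =>
    -- if source not in evidence[e]: evidence[e][source] = {}
    let d1 : PySem.Dict String (List (String × List (String × List String))) := PySem.Dict.mk d0
    let d1 := if d1.contains source then d1 else d1.insert source []
    -- if interactiontype not in evidence[e][source]: evidence[e][source][interactiontype] = {}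
    let s1 : PySem.Dict String (List (String × List String)) := PySem.Dict.mk (d1.getD source [])
    let s1 := if s1.contains interactiontype then s1 else s1.insert interactiontype []
    -- if detectionmethod not in …: … = set()
    let t1 : PySem.Dict String (PySem.Set String) := PySem.Dict.mk (s1.getD interactiontype [])
    let t1 := if t1.contains detectionmethod then t1 else t1.insert detectionmethod []
    -- evidence[e][source][interactiontype][detectionmethod].add(pubid)
    let t1 := t1.insert detectionmethod (PySem.Set.add (t1.getD detectionmethod []) pubid)
    -- write the mutated nested dicts back (Python mutates them in place through aliases)
    let s1 := s1.insert interactiontype t1.items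
    let d1 := d1.insert source s1.items
    let ev1 := storeEdge evidence e d1.items
    if directed then ev1
    else addToEvidenceDict ev1 (e.2, e.1) true source interactiontype detectionmethod pubid
termination_by (if directed then 0 else 1)
decreasing_by simp_all

-- ===== PORT B =====
-- `d.setdefault(k, v)` used for its return value: gives (the value now at k, the updated dict).
def setdefaultGet {V : Type} (d : PySem.Dict String V) (k : String) (v : V) : V × PySem.Dict String V :=
  let d' := d.setdefault k v
  (d'.getD k v, d')

-- One orientation: the three chained setdefaults and the set add of Source B's loop body,
-- with the aliased in-place mutations written back explicitly.
def insertOrientation (ev : List (String × String × List (String × List (String × List (String × List String))))) (edge : String × String) (source : String) (interactiontype : String) (detectionmethod : String) (pubid : String) : List (String × String × List (String × List (String × List (String × List String)))) :=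
  match lookupEdge ev edge with
  | none => ev   -- Python raises KeyError here; excluded by Pre_
  | some d0 =>
    let (s, d1) := setdefaultGet (PySem.Dict.mk d0) source []
    let (t, s1) := setdefaultGet (PySem.Dict.mk s) interactiontype []
    let (p, t1) := setdefaultGet (PySem.Dict.mk t) detectionmethod []
    let t2 := t1.insert detectionmethod (PySem.Set.add p pubid)
    let s2 := s1.insert interactiontype t2.items
    let d2 := d1.insert source s2.items
    storeEdge ev edge d2.items

-- Literal port of B: build the orientation list, then fold Source B's loop over it.
def addToEvidenceDict_alt (evidence : List (String × String × List (String × List (String × List (String × List String))))) (e : String × String) (directed : Bool) (source : String) (interactiontype : String) (detectionmethod : String) (pubid : String) : List (String × String × List (String × List (String × List (String × List String)))) :=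
  let edges := if directed then [e] else [e, (e.2, e.1)]
  edges.foldl (fun acc edge => insertOrientation acc edge source interactiontype detectionmethod pubid) evidence

-- ===== PRECONDITION & SPEC =====
-- Pre_ excludes exactly the inputs where Python A raises KeyError: the edge (and, when not
-- directed, its reverse) must be a key of the outer evidence dict.
def Pre_addToEvidenceDict (evidence : List (String × String × List (String × List (String × List (String × List String))))) (e : String × String) (directed : Bool) (source : String) (interactiontype : String) (detectionmethod : String) (pubid : String) : Prop :=
  (evidence.any (fun p => p.1 == e.1 && p.2.1 == e.2)) = true ∧
  (directed = false → (evidence.any (fun p => p.1 == e.2 && p.2.1 == e.1)) = true)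
instance (evidence : List (String × String × List (String × List (String × List (String × List String))))) (e : String × String) (directed : Bool) (source : String) (interactiontype : String) (detectionmethod : String) (pubid : String) : Decidable (Pre_addToEvidenceDict evidence e directed source interactiontype detectionmethod pubid) := by unfold Pre_addToEvidenceDict; infer_instance

def pvWitness_addToEvidenceDict : (List (String × String × List (String × List (String × List (String × List String))))) × (String × String) × Bool × String × String × String × String :=
  ([("a", "b", [])], ("a", "b"), true, "src", "it", "dm", "pub")

def Spec_addToEvidenceDict (evidence : List (String × String × List (String × List (String × List (String × List String))))) (e : String × String) (directed : Bool) (source : String) (interactiontype : String) (detectionmethod : String) (pubid : String) (out : List (String × String × List (String × List (String × List (String × List String))))) : Prop := out = addToEvidenceDict_alt evidence e directed source interactiontype detectionmethod pubid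
instance (evidence : List (String × String × List (String × List (String × List (String × List String))))) (e : String × String) (directed : Bool) (source : String) (interactiontype : String) (detectionmethod : String) (pubid : String) (out : List (String × String × List (String × List (String × List (String × List String))))) : Decidable (Spec_addToEvidenceDict evidence e directed source interactiontype detectionmethod pubid out) := by
  unfold Spec_addToEvidenceDict
  -- default synthesis gives up on this deeply nested type; supply the layers stepwise
  haveI h2 : DecidableEq (List (String × List (String × List String))) := inferInstance
  haveI h1 : DecidableEq (List (String × List (String × List (String × List String)))) := inferInstance
  haveI h0 : DecidableEq (List (String × String × List (String × List (String × List (String × List String))))) := inferInstance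
  infer_instance

-- ===== CLAIM (what is proved, stated in full; the proofs are below) =====
def Claim_equal_addToEvidenceDict : Prop := ∀ (evidence : List (String × String × List (String × List (String × List (String × List String))))) (e : String × String) (directed : Bool) (source : String) (interactiontype : String) (detectionmethod : String) (pubid : String), Dom_addToEvidenceDict evidence e directed source interactiontype detectionmethod pubid → Pre_addToEvidenceDict evidence e directed source interactiontype detectionmethod pubid → Spec_addToEvidenceDict evidence e directed source interactiontype detectionmethod pubid (addToEvidenceDict evidence e directed source interactiontype detectionmethod pubid)

-- ===== LEMMAS AND PROOFS =====
-- dict.setdefault written as A writes it: keep the dict if the key is present, else insert.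
theorem setdefault_eq {ν : Type} (d : PySem.Dict String ν) (k : String) (v : ν) :
    d.setdefault k v = if d.contains k then d else d.insert k v := by
  by_cases h : d.contains k = true <;> simp [PySem.Dict.setdefault, PySem.Dict.insert, h]

-- the Pre_ membership test is exactly "lookupEdge succeeds"
theorem lookupEdge_ne_none {V : Type} (ev : List (String × String × V)) (e : String × String)
    (h : (ev.any fun p => p.1 == e.1 && p.2.1 == e.2) = true) : lookupEdge ev e ≠ none := by
  induction ev with
  | nil => simp at h
  | cons hd tl ih =>
    obtain ⟨a, b, v⟩ := hd
    simp only [List.any_cons, Bool.or_eq_true] at h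
    unfold lookupEdge
    by_cases hc : (a == e.1 && b == e.2) = true
    · rw [if_pos hc]; simp
    · rw [if_neg hc]
      exact ih (h.resolve_left hc)

-- One insertion step of A (directed = true) is exactly B's loop body: after writing
-- `setdefault` in A's if/insert form the two chains coincide.
theorem stepA_eq_insertOrientation (ev : List (String × String × List (String × List (String × List (String × List String))))) (e : String × String) (source interactiontype detectionmethod pubid : String) :
    addToEvidenceDict ev e true source interactiontype detectionmethod pubid
      = insertOrientation ev e source interactiontype detectionmethod pubid := by
  unfold addToEvidenceDict insertOrientation setdefaultGet
  simp only [setdefault_eq]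
  cases lookupEdge ev e <;> simp

-- ===== VERDICT (by name: the statement is the Claim_ definition above) =====
theorem addToEvidenceDict_spec : Claim_equal_addToEvidenceDict := by
  intro evidence e directed source interactiontype detectionmethod pubid _ hpre
  unfold Spec_addToEvidenceDict
  cases directed
  · -- undirected: A recurses once on the reversed edge; B folds its loop over [e, (e.2, e.1)]
    obtain ⟨h1, _⟩ := hpre
    have hne := lookupEdge_ne_none evidence e h1
    conv_lhs => unfold addToEvidenceDict
    cases hl : lookupEdge evidence e with
    | none => exact absurd hl hne
    | some d0 =>
      simp only [addToEvidenceDict_alt, Bool.false_eq_true, if_false, List.foldl]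
      rw [stepA_eq_insertOrientation]
      congr 1
      conv_rhs => unfold insertOrientation
      rw [hl]
      unfold setdefaultGet
      simp only [setdefault_eq]
  · -- directed: one insertion step on each side
    simpa [addToEvidenceDict_alt, List.foldl] using
      stepA_eq_insertOrientation evidence e source interactiontype detectionmethod pubid
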